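-- pv_equiv track=rewrite | github.com/doubleZ0108/Leetcode | python/2389.和有限的最长子序列.py | answerQueries2
-- ===== SOURCE A (Python) =====
-- from typing import List
--
-- def answerQueries2(nums: List[int], queries: List[int]) -> List[int]:
--     nums.sort()
--     res = []
--     for query in queries:
--         total = 0
--         for i, num in enumerate(nums):
--             total += num
--             if total > query:
--                 res.append(i)
--                 break
--             if i == len(nums)-1:
--                 res.append(len(nums))
--
--     return res
-- ===== SOURCE B (Python) =====
-- from typing import List
--
-- def _bisect_gt(maxes: List[int], q: int) -> int:
--     """First index whose value exceeds q, in a nondecreasing list (hand-written bisect_right)."""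
--     lo, hi = 0, len(maxes)
--     while lo < hi:
--         mid = (lo + hi) // 2
--         if maxes[mid] <= q:
--             lo = mid + 1
--         else:
--             hi = mid
--     return lo
--
-- def answerQueries2(nums: List[int], queries: List[int]) -> List[int]:
--     nums.sort()
--     maxes = []  # running maxima of the prefix sums of sorted nums (nondecreasing)
--     total = 0
--     for x in nums:
--         total += x
--         maxes.append(total if not maxes else max(maxes[-1], total))
--     return [_bisect_gt(maxes, q) for q in queries]
-- ===== Notes on version B (the rewrite author's own statement) =====
-- stated objective: faster
-- what changed: Replaces A's per-query rescan of the sorted array's prefix sums by a single pass building the running maxima of the prefix sums followed by a hand-written binary search per query.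
-- intended difference: For empty nums with nonempty queries A's inner loop never appends so A returns [] (fewer answers than queries), while B returns 0 for every query, the intended length of the longest subsequence with sum <= query of an empty array. — e.g. on answerQueries2([], [5]): A returns [], B returns [0]
import Mathlib
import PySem

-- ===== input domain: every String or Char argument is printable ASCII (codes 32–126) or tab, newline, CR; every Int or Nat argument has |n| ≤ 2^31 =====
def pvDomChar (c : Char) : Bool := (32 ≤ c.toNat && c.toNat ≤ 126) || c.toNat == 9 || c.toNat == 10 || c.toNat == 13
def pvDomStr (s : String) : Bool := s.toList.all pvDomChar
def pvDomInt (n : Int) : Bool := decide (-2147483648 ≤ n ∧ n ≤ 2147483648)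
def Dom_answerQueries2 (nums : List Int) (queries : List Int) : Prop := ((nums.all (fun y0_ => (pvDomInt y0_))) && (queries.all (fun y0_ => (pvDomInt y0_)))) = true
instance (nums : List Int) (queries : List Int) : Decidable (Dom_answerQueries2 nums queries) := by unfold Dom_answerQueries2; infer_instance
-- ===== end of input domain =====

-- B replaces A's per-query rescan of prefix sums by one pass building the running maxima of
-- the prefix sums of the sorted list plus a hand-written binary search per query.
-- Both A and B sort `nums` in place (same side effect); the claims below are about the return value.

-- ===== PORT A =====
-- inner 'for i, num in enumerate(nums)' loop of A, carrying total; returns what it appends to res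
def aqInner (n : Int) : List (Int × Int) → Int → Int → List Int
  | [], _, _ => []
  | (i, num) :: rest, total, query =>
      let total := total + num
      if total > query then [i]
      else if i = n - 1 then n :: aqInner n rest total query
      else aqInner n rest total query

def answerQueries2 (nums : List Int) (queries : List Int) : List Int :=
  let s := PySem.List.sorted nums (fun x => x) false
  queries.foldl (fun res query =>
    res ++ aqInner (s.length : Int) (PySem.List.enumerate s) 0 query) []

-- ===== PORT B =====
-- the 'while lo < hi' bisection loop; fuel = hi - lo makes it total, m[mid] is always in range
def aqBisect (m : List Int) (q : Int) : Nat → Nat → Nat → Nat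
  | 0, lo, _ => lo
  | fuel + 1, lo, hi =>
      if lo < hi then
        let mid := (lo + hi) / 2
        if m.getD mid 0 ≤ q then aqBisect m q fuel (mid + 1) hi
        else aqBisect m q fuel lo mid
      else lo

-- the 'for x in nums' loop building maxes; `last` carries maxes[-1] (none = maxes empty)
def aqMaxes : List Int → Int → Option Int → List Int
  | [], _, _ => []
  | x :: rest, total, last =>
      let total := total + x
      let b := match last with | none => total | some m => max m total
      b :: aqMaxes rest total (some b)

def answerQueries2_alt (nums : List Int) (queries : List Int) : List Int :=
  let s := PySem.List.sorted nums (fun x => x) false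
  let maxes := aqMaxes s 0 none
  queries.map (fun q => ((aqBisect maxes q maxes.length 0 maxes.length : Nat) : Int))

-- ===== PRECONDITION & SPEC =====
-- For empty `nums` and nonempty `queries` A's inner loop never appends, so A returns []
-- (fewer answers than queries); B returns the intended answer 0 for every query.
def D_answerQueries2 (nums : List Int) (queries : List Int) : Prop := nums = [] ∧ queries ≠ []
instance (nums : List Int) (queries : List Int) : Decidable (D_answerQueries2 nums queries) := by unfold D_answerQueries2; infer_instance

def Spec_answerQueries2 (nums : List Int) (queries : List Int) (out : List Int) : Prop :=
  ¬ D_answerQueries2 nums queries → out = answerQueries2_alt nums queries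
instance (nums : List Int) (queries : List Int) (out : List Int) : Decidable (Spec_answerQueries2 nums queries out) := by unfold Spec_answerQueries2; infer_instance

def pvDiffWitness_answerQueries2 : List Int × List Int := ([], [5])
def pvDiffWitnessOut_answerQueries2 : (List Int) × (List Int) := ([], [0])

-- ===== CLAIM (what is proved, stated in full; the proofs are below) =====
def Claim_unchanged_answerQueries2 : Prop := ∀ (nums : List Int) (queries : List Int), Dom_answerQueries2 nums queries → Spec_answerQueries2 nums queries (answerQueries2 nums queries)
def Claim_changed_answerQueries2 : Prop := Dom_answerQueries2 (pvDiffWitness_answerQueries2.1) (pvDiffWitness_answerQueries2.2) ∧ D_answerQueries2 (pvDiffWitness_answerQueries2.1) (pvDiffWitness_answerQueries2.2) ∧ answerQueries2 (pvDiffWitness_answerQueries2.1) (pvDiffWitness_answerQueries2.2) = pvDiffWitnessOut_answerQueries2.1 ∧ answerQueries2_alt (pvDiffWitness_answerQueries2.1) (pvDiffWitness_answerQueries2.2) = pvDiffWitnessOut_answerQueries2.2 ∧ pvDiffWitnessOut_answerQueries2.1 ≠ pvDiffWitnessOut_answerQueries2.2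
def Claim_exact_answerQueries2 : Prop := ∀ (nums : List Int) (queries : List Int), Dom_answerQueries2 nums queries → D_answerQueries2 nums queries → answerQueries2 nums queries ≠ answerQueries2_alt nums queries

-- ===== LEMMAS AND PROOFS =====

-- spec-side count: first index whose prefix sum (from `total`) exceeds q, else length
def aqG : List Int → Int → Int → Nat
  | [], _, _ => 0
  | x :: rest, total, q => if total + x > q then 0 else aqG rest (total + x) q + 1

lemma aqInner_char (l : List Int) (k total q : Int) (n : Nat)
    (hne : l ≠ []) (hk : k + l.length = n) :
    aqInner (n : Int) (PySem.List.enumerate l k) total q = [k + (aqG l total q : Nat)] := by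
  induction l generalizing k total with
  | nil => exact absurd rfl hne
  | cons x rest ih =>
      rw [PySem.List.enumerate_cons]
      simp only [aqInner, aqG, List.length_cons] at *
      by_cases hcr : total + x > q
      · simp [hcr]
      · simp only [if_neg hcr]
        by_cases hlast : k = (n : Int) - 1
        · have hrest : rest = [] := by
            have : (rest.length : Int) = 0 := by push_cast at hk ⊢; omega
            simpa using this
          subst hrest
          simp [hlast, aqInner, PySem.List.enumerate, aqG]
        · have hrne : rest ≠ [] := by
            intro h; subst h; simp at hk; omega
          rw [if_neg hlast, ih (k + 1) (total + x) hrne (by push_cast at hk ⊢; omega)]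
          simp only [List.cons.injEq, and_true]
          push_cast
          ring

lemma aqG_eq_takeWhile (l : List Int) (total q : Int) (last : Option Int)
    (hlast : ∀ b, last = some b → b ≤ q) :
    aqG l total q = ((aqMaxes l total last).takeWhile (fun y => decide (y ≤ q))).length := by
  induction l generalizing total last with
  | nil => simp [aqG, aqMaxes]
  | cons x rest ih =>
      cases last with
      | none =>
          simp only [aqG, aqMaxes]
          by_cases hcr : total + x > q
          · simp [hcr, show ¬(total + x ≤ q) from by omega]
          · have hble : total + x ≤ q := by omega
            simp only [if_neg hcr, List.takeWhile_cons, decide_eq_true hble, if_pos,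
              List.length_cons]
            rw [ih (total + x) (some (total + x)) (by rintro b ⟨⟩; omega)]
      | some m =>
          have hm : m ≤ q := hlast m rfl
          simp only [aqG, aqMaxes]
          by_cases hcr : total + x > q
          · simp [hcr, show ¬(max m (total + x) ≤ q) from by omega]
          · have hble : max m (total + x) ≤ q := by omega
            simp only [if_neg hcr, List.takeWhile_cons, decide_eq_true hble, if_pos,
              List.length_cons]
            rw [ih (total + x) (some (max m (total + x))) (by rintro b ⟨⟩; omega)]

lemma aqMaxes_lower (l : List Int) (total b : Int) :
    ∀ y ∈ aqMaxes l total (some b), b ≤ y := by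
  induction l generalizing total b with
  | nil => simp [aqMaxes]
  | cons x rest ih =>
      intro y hy
      simp only [aqMaxes, List.mem_cons] at hy
      rcases hy with h | h
      · subst h; exact le_max_left _ _
      · exact le_trans (le_max_left _ _) (ih (total + x) _ y h)

lemma aqMaxes_pairwise (l : List Int) (total : Int) (last : Option Int) :
    (aqMaxes l total last).Pairwise (· ≤ ·) := by
  induction l generalizing total last with
  | nil => simp [aqMaxes]
  | cons x rest ih =>
      simp only [aqMaxes]
      exact List.Pairwise.cons (aqMaxes_lower rest (total + x) _) (ih (total + x) _)

lemma takeWhile_getD (p : Int → Bool) (m : List Int) (i : Nat)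
    (h : i < (m.takeWhile p).length) : p (m.getD i 0) = true := by
  induction m generalizing i with
  | nil => simp [List.takeWhile] at h
  | cons x rest ih =>
      by_cases hp : p x
      · cases i with
        | zero => simpa using hp
        | succ j =>
            simp only [List.takeWhile, hp, List.length_cons] at h
            exact ih j (by omega)
      · simp [List.takeWhile, hp] at h

lemma takeWhile_boundary (p : Int → Bool) (m : List Int)
    (h : (m.takeWhile p).length < m.length) :
    p (m.getD (m.takeWhile p).length 0) = false := by
  induction m with
  | nil => simp at h
  | cons x rest ih =>
      by_cases hp : p x
      · simp only [List.takeWhile, hp, List.length_cons] at h ⊢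
        exact ih (by omega)
      · simp [List.takeWhile, hp]

lemma pairwise_getD (m : List Int) (hp : m.Pairwise (· ≤ ·)) (i j : Nat)
    (hij : i ≤ j) (hj : j < m.length) : m.getD i 0 ≤ m.getD j 0 := by
  rcases eq_or_lt_of_le hij with rfl | hlt
  · exact le_refl _
  · rw [List.getD_eq_getElem _ _ (by omega), List.getD_eq_getElem _ _ hj]
    exact (List.pairwise_iff_getElem.mp hp) i j (by omega) hj hlt

lemma aqBisect_eq (m : List Int) (q : Int) (c : Nat)
    (H1 : ∀ i, i < c → m.getD i 0 ≤ q)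
    (H2 : ∀ i, c ≤ i → i < m.length → ¬ (m.getD i 0 ≤ q)) :
    ∀ fuel lo hi, lo ≤ c → c ≤ hi → hi ≤ m.length → hi - lo ≤ fuel →
      aqBisect m q fuel lo hi = c := by
  intro fuel
  induction fuel with
  | zero => intro lo hi h1 h2 h3 h4; simp only [aqBisect]; omega
  | succ f ih =>
      intro lo hi h1 h2 h3 h4
      simp only [aqBisect]
      by_cases hlh : lo < hi
      · rw [if_pos hlh]
        by_cases hmid : m.getD ((lo + hi) / 2) 0 ≤ q
        · rw [if_pos hmid]
          have hmc : (lo + hi) / 2 < c := by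
            by_contra hge
            exact H2 _ (by omega) (by omega) hmid
          exact ih _ _ (by omega) h2 h3 (by omega)
        · rw [if_neg hmid]
          have hmc : c ≤ (lo + hi) / 2 := by
            by_contra hge
            exact hmid (H1 _ (by omega))
          exact ih _ _ h1 hmc (by omega) (by omega)
      · rw [if_neg hlh]; omega

-- per-query value of B equals the spec-side count
lemma aqBisect_full (s : List Int) (q : Int) :
    aqBisect (aqMaxes s 0 none) q (aqMaxes s 0 none).length 0 (aqMaxes s 0 none).length
      = aqG s 0 q := by
  set m := aqMaxes s 0 none with hm
  set c := (m.takeWhile (fun y => decide (y ≤ q))).length with hc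
  have hcl : c ≤ m.length := by
    rw [hc]; exact (List.takeWhile_prefix _).length_le
  have H1 : ∀ i, i < c → m.getD i 0 ≤ q := by
    intro i hi
    have := takeWhile_getD (fun y => decide (y ≤ q)) m i (hc ▸ hi)
    simpa using this
  have H2 : ∀ i, c ≤ i → i < m.length → ¬ (m.getD i 0 ≤ q) := by
    intro i hci hil
    have hcm : c < m.length := by omega
    have hb := takeWhile_boundary (fun y => decide (y ≤ q)) m (hc ▸ hcm)
    have hbq : ¬ (m.getD c 0 ≤ q) := by simpa using hb
    intro hle
    exact hbq (le_trans (pairwise_getD m (hm ▸ aqMaxes_pairwise s 0 none) c i hci hil) hle)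
  rw [aqBisect_eq m q c H1 H2 m.length 0 m.length (by omega) hcl (le_refl _) (by omega)]
  rw [hc, hm]
  exact (aqG_eq_takeWhile s 0 q none (by intro b h; cases h)).symm

lemma foldl_inner_eq_map (s : List Int) (hs : s ≠ []) (queries acc : List Int) :
    queries.foldl (fun res query =>
        res ++ aqInner (s.length : Int) (PySem.List.enumerate s) 0 query) acc
      = acc ++ queries.map (fun q => ((aqG s 0 q : Nat) : Int)) := by
  induction queries generalizing acc with
  | nil => simp
  | cons q qs ih =>
      simp only [List.foldl_cons, List.map_cons]
      rw [ih, aqInner_char s 0 0 q s.length hs (by omega)]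
      simp

lemma answerQueries2_nil (queries : List Int) : answerQueries2 [] queries = [] := by
  unfold answerQueries2
  induction queries with
  | nil => rfl
  | cons q qs ih =>
      simp only [List.foldl_cons]
      simpa [PySem.List.sorted, PySem.List.enumerate, aqInner] using ih

-- ===== VERDICT (by name: the statement is the Claim_ definition above) =====
theorem answerQueries2_spec : Claim_unchanged_answerQueries2 := by
  intro nums queries _
  unfold Spec_answerQueries2
  intro hnd
  cases hnums : nums with
  | nil =>
      have hq : queries = [] := by
        by_contra hq
        exact hnd ⟨hnums, hq⟩
      subst hq
      simp [answerQueries2_nil, answerQueries2_alt]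
  | cons a as =>
      subst hnums
      unfold answerQueries2 answerQueries2_alt
      have hsne : PySem.List.sorted (a :: as) (fun x => x) false ≠ [] := by
        intro h
        have hl := congrArg List.length h
        rw [PySem.List.length_sorted] at hl
        simp at hl
      simp only []
      rw [foldl_inner_eq_map _ hsne]
      simp only [List.nil_append]
      apply List.map_congr_left
      intro q _
      rw [aqBisect_full]

theorem answerQueries2_changed : Claim_changed_answerQueries2 := by
  unfold Claim_changed_answerQueries2; decide

theorem answerQueries2_tight : Claim_exact_answerQueries2 := by
  intro nums queries _ hd
  obtain ⟨hn, hq⟩ := hd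
  subst hn
  rw [answerQueries2_nil]
  intro h
  apply hq
  have := congrArg List.length h
  simp [answerQueries2_alt] at this
  exact List.eq_nil_of_length_eq_zero this.symm
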